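-- pv_equiv track=rewrite | github.com/Indranil2020/Indranil2020.github.io | scripts/generate_publications_html.py | categorize_publications
-- ===== SOURCE A (Python) =====
-- from typing import List, Dict
--
-- def categorize_publications(publications: List[Dict]) -> Dict:
--     """Categorize publications by type"""
--     journals = []
--     conferences = []
--     book_chapters = []
--
--     for pub in publications:
--         venue = pub.get('venue', '').lower()
--         title = pub.get('title', '').lower()
--
--         # Categorization logic
--         if any(keyword in venue for keyword in ['proceedings', 'conference', 'workshop', 'materials today']):
--             conferences.append(pub)
--         elif any(keyword in venue for keyword in ['springer proceedings', 'lecture notes', 'advances in']):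
--             book_chapters.append(pub)
--         else:
--             journals.append(pub)
--
--     return {
--         'journals': sorted(journals, key=lambda x: int(x.get('year', 0)), reverse=True),
--         'conferences': sorted(conferences, key=lambda x: int(x.get('year', 0)), reverse=True),
--         'book_chapters': sorted(book_chapters, key=lambda x: int(x.get('year', 0)), reverse=True)
--     }
-- ===== SOURCE B (Python) =====
-- from typing import List, Dict
--
-- def categorize_publications(publications: List[Dict]) -> Dict:
--     """Categorize publications by type: classify each pub to a category name,
--     sort the whole list once (stable, year descending), and build the result
--     as a comprehension over the category names filtering that one sorted list."""
--     def category(pub):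
--         venue = pub.get('venue', '').lower()
--         if any(k in venue for k in ['proceedings', 'conference', 'workshop', 'materials today']):
--             return 'conferences'
--         if any(k in venue for k in ['springer proceedings', 'lecture notes', 'advances in']):
--             return 'book_chapters'
--         return 'journals'
--     ordered = sorted(publications, key=lambda x: int(x.get('year', 0)), reverse=True)
--     return {name: [p for p in ordered if category(p) == name]
--             for name in ('journals', 'conferences', 'book_chapters')}
-- ===== Notes on version B (the rewrite author's own statement) =====
-- stated objective: alternative
-- what changed: B replaces A's three-bucket accumulator loop followed by three per-bucket sorts with a single whole-list stable sort plus a classification function mapped through a comprehension over the category names (one filter per name), relying on sort stability so no bucket is re-sorted.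
import Mathlib
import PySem

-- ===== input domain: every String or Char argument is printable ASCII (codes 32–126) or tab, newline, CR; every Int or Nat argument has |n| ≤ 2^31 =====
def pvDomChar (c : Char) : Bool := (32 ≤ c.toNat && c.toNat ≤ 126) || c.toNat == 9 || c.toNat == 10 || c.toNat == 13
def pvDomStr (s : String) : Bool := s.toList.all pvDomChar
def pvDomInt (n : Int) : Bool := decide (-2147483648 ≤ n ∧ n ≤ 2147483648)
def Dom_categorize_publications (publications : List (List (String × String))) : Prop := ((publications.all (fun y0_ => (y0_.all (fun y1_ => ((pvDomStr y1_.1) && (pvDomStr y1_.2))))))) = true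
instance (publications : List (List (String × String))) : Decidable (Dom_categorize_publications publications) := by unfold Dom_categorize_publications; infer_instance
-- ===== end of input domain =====

-- B sorts the whole list once by year descending and builds the result by mapping a classification
-- function over the category names (one filter per name); A partitions with a loop and sorts each bucket.


-- ===== PORT A =====
-- keyword lists of the if/elif chain, in A's order
def pvKws1 : List String := ["proceedings", "conference", "workshop", "materials today"]
def pvKws2 : List String := ["springer proceedings", "lecture notes", "advances in"]
-- pub.get('venue', '').lower()
def pvVenue (pub : List (String × String)) : String :=
  PySem.Str.lower (PySem.Dict.getD (PySem.Dict.mk pub) "venue" "")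
-- int(x.get('year', 0)); the parse succeeds under Pre_ (the missing-key default 0 is always fine)
def pvYearKey (pub : List (String × String)) : Int :=
  (PySem.Int.ofStr? (PySem.Dict.getD (PySem.Dict.mk pub) "year" "0")).getD 0

def categorize_publications (publications : List (List (String × String))) : List (String × List (List (String × String))) :=
  let r := publications.foldl (fun acc pub =>
    let venue := pvVenue pub
    let _title := PySem.Str.lower (PySem.Dict.getD (PySem.Dict.mk pub) "title" "")
    if pvKws1.any (fun keyword => PySem.Str.isIn keyword venue) then
      (acc.1, acc.2.1 ++ [pub], acc.2.2)
    else if pvKws2.any (fun keyword => PySem.Str.isIn keyword venue) then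
      (acc.1, acc.2.1, acc.2.2 ++ [pub])
    else
      (acc.1 ++ [pub], acc.2.1, acc.2.2)) ([], [], [])
  [("journals", PySem.List.sorted r.1 pvYearKey true),
   ("conferences", PySem.List.sorted r.2.1 pvYearKey true),
   ("book_chapters", PySem.List.sorted r.2.2 pvYearKey true)]

-- ===== PORT B =====
-- B's inner 'category' helper: the name of the bucket a publication belongs to
def pvCategory (pub : List (String × String)) : String :=
  if pvKws1.any (fun k => PySem.Str.isIn k (pvVenue pub)) then "conferences"
  else if pvKws2.any (fun k => PySem.Str.isIn k (pvVenue pub)) then "book_chapters"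
  else "journals"

def categorize_publications_alt (publications : List (List (String × String))) : List (String × List (List (String × String))) :=
  let ordered := PySem.List.sorted publications pvYearKey true
  ["journals", "conferences", "book_chapters"].map
    (fun name => (name, ordered.filter (fun p => pvCategory p == name)))

-- ===== PRECONDITION & SPEC =====
-- Pre_ excludes exactly the inputs on which Python's int(x.get('year', 0)) raises ValueError
-- (a present 'year' value that does not parse as an int); both A and B raise there.
def Pre_categorize_publications (publications : List (List (String × String))) : Prop :=
  (publications.all (fun pub =>
    (PySem.Int.ofStr? (PySem.Dict.getD (PySem.Dict.mk pub) "year" "0")).isSome)) = true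
instance (publications : List (List (String × String))) : Decidable (Pre_categorize_publications publications) := by unfold Pre_categorize_publications; infer_instance

def pvWitness_categorize_publications : (List (List (String × String))) :=
  [[("venue", "Proceedings of X"), ("year", "2020")], [("venue", "J. Phys."), ("year", "2019")]]

def Spec_categorize_publications (publications : List (List (String × String))) (out : List (String × List (List (String × String)))) : Prop := out = categorize_publications_alt publications
instance (publications : List (List (String × String))) (out : List (String × List (List (String × String)))) : Decidable (Spec_categorize_publications publications out) := by unfold Spec_categorize_publications; infer_instance

-- ===== CLAIM (what is proved, stated in full; the proofs are below) =====
def Claim_equal_categorize_publications : Prop := ∀ (publications : List (List (String × String))), Dom_categorize_publications publications → Pre_categorize_publications publications → Spec_categorize_publications publications (categorize_publications publications)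

-- ===== LEMMAS AND PROOFS =====

-- the three disjoint bucket predicates determined by the if/elif chain
def pvIsConf (pub : List (String × String)) : Bool :=
  pvKws1.any (fun keyword => PySem.Str.isIn keyword (pvVenue pub))
def pvIsBC (pub : List (String × String)) : Bool :=
  !pvIsConf pub && pvKws2.any (fun keyword => PySem.Str.isIn keyword (pvVenue pub))
def pvIsJ (pub : List (String × String)) : Bool :=
  !pvIsConf pub && !(pvKws2.any (fun keyword => PySem.Str.isIn keyword (pvVenue pub)))

-- A's loop body
def pvStep (acc : List (List (String × String)) × List (List (String × String)) × List (List (String × String)))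
    (pub : List (String × String)) :
    List (List (String × String)) × List (List (String × String)) × List (List (String × String)) :=
  if pvKws1.any (fun keyword => PySem.Str.isIn keyword (pvVenue pub)) then
    (acc.1, acc.2.1 ++ [pub], acc.2.2)
  else if pvKws2.any (fun keyword => PySem.Str.isIn keyword (pvVenue pub)) then
    (acc.1, acc.2.1, acc.2.2 ++ [pub])
  else
    (acc.1 ++ [pub], acc.2.1, acc.2.2)

-- A's partition loop computed by foldl is the triple of filters
theorem pv_foldl_classify (pubs : List (List (String × String))) :
    ∀ (j c b : List (List (String × String))),
      pubs.foldl pvStep (j, c, b)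
        = (j ++ pubs.filter pvIsJ, c ++ pubs.filter pvIsConf, b ++ pubs.filter pvIsBC) := by
  induction pubs with
  | nil => intro j c b; simp
  | cons pub rest ih =>
      intro j c b
      rw [List.foldl_cons]
      cases h1 : pvKws1.any (fun keyword => PySem.Str.isIn keyword (pvVenue pub)) with
      | true =>
          have hC : pvIsConf pub = true := h1
          have hJ : pvIsJ pub = false := by simp only [pvIsJ, hC]; rfl
          have hB : pvIsBC pub = false := by simp only [pvIsBC, hC]; rfl
          have hstep : pvStep (j, c, b) pub = (j, c ++ [pub], b) := by
            simp only [pvStep, h1, if_true]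
          rw [hstep, ih]
          simp [hC, hJ, hB, List.append_assoc]
      | false =>
          cases h2 : pvKws2.any (fun keyword => PySem.Str.isIn keyword (pvVenue pub)) with
          | true =>
              have hC : pvIsConf pub = false := h1
              have hJ : pvIsJ pub = false := by simp only [pvIsJ, hC, h2]; rfl
              have hB : pvIsBC pub = true := by simp only [pvIsBC, hC, h2]; rfl
              have hstep : pvStep (j, c, b) pub = (j, c, b ++ [pub]) := by
                simp only [pvStep, h1, h2, Bool.false_eq_true, if_false, if_true]
              rw [hstep, ih]
              simp [hC, hJ, hB, List.append_assoc]
          | false =>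
              have hC : pvIsConf pub = false := h1
              have hJ : pvIsJ pub = true := by simp only [pvIsJ, hC, h2]; rfl
              have hB : pvIsBC pub = false := by simp only [pvIsBC, hC, h2]; rfl
              have hstep : pvStep (j, c, b) pub = (j ++ [pub], c, b) := by
                simp only [pvStep, h1, h2, Bool.false_eq_true, if_false]
              rw [hstep, ih]
              simp [hC, hJ, hB, List.append_assoc]

-- B's name-equality tests coincide with the if/elif bucket predicates
-- (cases on the two keyword tests makes both sides literal, so decide closes each branch)
theorem pvCat_conf (p : List (String × String)) : (pvCategory p == "conferences") = pvIsConf p := by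
  unfold pvCategory pvIsConf
  cases h1 : pvKws1.any (fun k => PySem.Str.isIn k (pvVenue p)) <;>
    cases h2 : pvKws2.any (fun k => PySem.Str.isIn k (pvVenue p)) <;> decide
theorem pvCat_bc (p : List (String × String)) : (pvCategory p == "book_chapters") = pvIsBC p := by
  unfold pvCategory pvIsBC pvIsConf
  cases h1 : pvKws1.any (fun k => PySem.Str.isIn k (pvVenue p)) <;>
    cases h2 : pvKws2.any (fun k => PySem.Str.isIn k (pvVenue p)) <;> decide
theorem pvCat_j (p : List (String × String)) : (pvCategory p == "journals") = pvIsJ p := by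
  unfold pvCategory pvIsJ pvIsConf
  cases h1 : pvKws1.any (fun k => PySem.Str.isIn k (pvVenue p)) <;>
    cases h2 : pvKws2.any (fun k => PySem.Str.isIn k (pvVenue p)) <;> decide

-- filtering commutes with insertBy into a (reverse-)ordered list
theorem pv_filter_insertBy {α : Type} (key : α → Int) (p : α → Bool) (x : α) :
    ∀ (ys : List α), ys.Pairwise (fun a b => key b ≤ key a) →
      (PySem.List.insertBy (fun a b => decide (key b < key a)) x ys).filter p
        = if p x then PySem.List.insertBy (fun a b => decide (key b < key a)) x (ys.filter p)
          else ys.filter p := by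
  intro ys
  induction ys with
  | nil =>
      intro _
      by_cases hpx : p x = true <;> simp [PySem.List.insertBy, List.filter, hpx]
  | cons y ys ih =>
      intro hp
      rw [List.pairwise_cons] at hp
      obtain ⟨hhead, htail⟩ := hp
      by_cases hyx : key y < key x
      · simp only [PySem.List.insertBy, hyx, decide_true, if_true]
        by_cases hpy : p y = true
        · simp only [List.filter, hpy]
          by_cases hpx : p x = true
          · simp [hpx, PySem.List.insertBy, hyx]
          · simp at hpx; simp [hpx]
        · simp at hpy
          simp only [List.filter, hpy]
          by_cases hpx : p x = true
          · simp only [hpx, if_true]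
            cases hfy : ys.filter p with
            | nil => simp [PySem.List.insertBy]
            | cons z l =>
                have hz : z ∈ ys := by
                  have : z ∈ ys.filter p := by rw [hfy]; exact List.mem_cons_self
                  exact List.mem_of_mem_filter this
                have : key z < key x := lt_of_le_of_lt (hhead z hz) hyx
                simp [PySem.List.insertBy, this]
          · simp at hpx; simp [hpx]
      · have hd : (decide (key y < key x)) = false := by simp [hyx]
        simp only [PySem.List.insertBy, hd, Bool.false_eq_true, if_false]
        have ihr := ih htail
        by_cases hpy : p y = true
        · simp only [List.filter, hpy, ihr]
          by_cases hpx : p x = true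
          · simp [hpx, PySem.List.insertBy, hd]
          · simp at hpx; simp [hpx]
        · simp at hpy
          simp only [List.filter, hpy, ihr]

-- appending one element to a reverse-sorted build = one insertBy step
theorem pv_sorted_rev_append_singleton {α : Type} (key : α → Int) (xs : List α) (x : α) :
    PySem.List.sorted (xs ++ [x]) key true
      = PySem.List.insertBy (fun a b => decide (key b < key a)) x (PySem.List.sorted xs key true) := by
  rw [PySem.List.sorted_rev_eq_foldl_insertBy, PySem.List.sorted_rev_eq_foldl_insertBy,
    List.foldl_append]
  rfl

-- stability: filtering after the one big sort = sorting the filtered bucket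
theorem pv_filter_sorted {α : Type} (key : α → Int) (p : α → Bool) (xs : List α) :
    (PySem.List.sorted xs key true).filter p = PySem.List.sorted (xs.filter p) key true := by
  induction xs using List.reverseRecOn with
  | nil => rfl
  | append_singleton ys x ih =>
      rw [pv_sorted_rev_append_singleton,
        pv_filter_insertBy key p x _ (PySem.List.sorted_pairwise_rev ys key), ih,
        List.filter_append]
      by_cases hpx : p x = true
      · simp only [hpx, if_true, List.filter]
        rw [pv_sorted_rev_append_singleton]
      · simp at hpx
        simp [List.filter, hpx]

-- ===== VERDICT (by name: the statement is the Claim_ definition above) =====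
theorem categorize_publications_spec : Claim_equal_categorize_publications := by
  intro publications _ _
  unfold Spec_categorize_publications categorize_publications categorize_publications_alt
  have hstepA : (fun (acc : List (List (String × String)) × List (List (String × String)) × List (List (String × String))) pub =>
      let venue := pvVenue pub
      let _title := PySem.Str.lower (PySem.Dict.getD (PySem.Dict.mk pub) "title" "")
      if pvKws1.any (fun keyword => PySem.Str.isIn keyword venue) then
        (acc.1, acc.2.1 ++ [pub], acc.2.2)
      else if pvKws2.any (fun keyword => PySem.Str.isIn keyword venue) then
        (acc.1, acc.2.1, acc.2.2 ++ [pub])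
      else
        (acc.1 ++ [pub], acc.2.1, acc.2.2)) = pvStep := by
    funext acc pub; rfl
  have hJ : (fun p => pvCategory p == "journals") = pvIsJ := funext pvCat_j
  have hC : (fun p => pvCategory p == "conferences") = pvIsConf := funext pvCat_conf
  have hB : (fun p => pvCategory p == "book_chapters") = pvIsBC := funext pvCat_bc
  simp only [hstepA, pv_foldl_classify, List.nil_append, List.map_cons, List.map_nil,
    hJ, hC, hB, pv_filter_sorted]
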